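-- pv_equiv track=rewrite | github.com/fishsauce-05/PythonInPTIT | PY01003.py | solve
-- ===== SOURCE A (Python) =====
-- def solve(num: str) -> str:
-- 	nums = list(map(int, num))
-- 	n = len(nums)
-- 	if len(nums) == 1:
-- 		return nums[0]
-- 	for i in range(n-1, 0, -1):
-- 		if nums[i] >= 5:
-- 			nums[i-1] += 1
-- 	return str(nums[0]) + '0' * (n-1)
-- ===== SOURCE B (Python) =====
-- def solve(num: str) -> str:
--     digits = [int(c) for c in num]
--     if len(digits) == 1:
--         return digits[0]
--     # carry into the leading digit: decided by the first tail digit that is not 4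
--     bump = 0
--     for d in digits[1:]:
--         if d >= 5:
--             bump = 1
--             break
--         if d < 4:
--             break
--     return str(digits[0] + bump) + '0' * (len(digits) - 1)
-- ===== Notes on version B (the rewrite author's own statement) =====
-- stated objective: simpler
-- what changed: Replaces the right-to-left in-place mutation of the digit list by a read-only left-to-right scan of the tail with early exit: the carry into the leading digit equals 1 iff the first non-4 tail digit is >= 5, so only a single scalar bump is computed and the output is assembled directly.
-- outside the precondition, e.g. on solve('7'): A returns 7, B returns 7
import Mathlib
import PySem

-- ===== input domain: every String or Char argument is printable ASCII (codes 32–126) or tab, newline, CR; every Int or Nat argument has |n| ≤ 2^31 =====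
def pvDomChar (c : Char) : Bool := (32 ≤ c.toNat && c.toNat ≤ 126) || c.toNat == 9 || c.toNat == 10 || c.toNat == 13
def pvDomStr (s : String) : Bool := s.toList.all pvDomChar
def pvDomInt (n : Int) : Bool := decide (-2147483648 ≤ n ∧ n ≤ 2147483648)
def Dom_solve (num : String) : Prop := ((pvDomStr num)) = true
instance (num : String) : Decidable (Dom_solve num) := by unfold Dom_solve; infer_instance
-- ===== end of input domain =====

-- B differs from A by computing the carry with a read-only early-exit scan of the tail instead of
-- mutating the digit list right-to-left (objective: simpler).

-- int(c) for a single character: exact on the printable-ASCII domain (only '0'..'9' succeed;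
-- every other single printable character raises ValueError = none). Shared by both ports.
def intOfDigitChar? (c : Char) : Option Int :=
  if c.isDigit then some ((c.toNat : Int) - 48) else none

-- ===== PORT A =====
-- step of A's loop body: 'if nums[i] >= 5: nums[i-1] += 1' (pyGetD/pySetD: indices are in range under Pre_)
def solveStep (ns : List Int) (i : Int) : List Int :=
  if PySem.List.pyGetD ns i 0 ≥ 5 then
    PySem.List.pySetD ns (i - 1) (PySem.List.pyGetD ns (i - 1) 0 + 1)
  else ns

def solve (num : String) : String :=
  let nums : List Int := num.toList.map (fun c => (intOfDigitChar? c).getD 0)  -- list(map(int, num)); total form, exact under Pre_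
  let n : Int := nums.length
  if nums.length == 1 then
    PySem.Int.toStr (PySem.List.pyGetD nums 0 0)  -- Python returns the bare int nums[0] here (not a str): outside Pre_
  else
    let nums' := (PySem.List.pyRange (n - 1) 0 (-1)).foldl solveStep nums
    PySem.Int.toStr (PySem.List.pyGetD nums' 0 0) ++ String.ofList (PySem.List.pyRepeat ['0'] (n - 1))

-- ===== PORT B =====
-- Source B's 'for d in digits[1:]' loop with its two breaks, as structural recursion
def bumpScan : List Int → Int
  | [] => 0
  | d :: rest => if d ≥ 5 then 1 else if d < 4 then 0 else bumpScan rest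

def solve_alt (num : String) : String :=
  let digits : List Int := num.toList.map (fun c => (intOfDigitChar? c).getD 0)
  if digits.length == 1 then
    PySem.Int.toStr (PySem.List.pyGetD digits 0 0)  -- Source B returns the bare int digits[0] here: outside Pre_
  else
    let bump := bumpScan (digits.drop 1)  -- digits[1:]
    PySem.Int.toStr (PySem.List.pyGetD digits 0 0 + bump) ++
      String.ofList (PySem.List.pyRepeat ['0'] ((digits.length : Int) - 1))

-- ===== PRECONDITION & SPEC =====
-- Pre_ excludes: non-digit characters and the empty string (A raises ValueError / IndexError), and
-- single-character digit strings, on which A returns the bare int nums[0] — not a value of the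
-- declared str return type.
def Pre_solve (num : String) : Prop :=
  2 ≤ num.toList.length ∧ num.toList.all (fun c => c.isDigit) = true

instance (num : String) : Decidable (Pre_solve num) := by unfold Pre_solve; infer_instance

def pvWitness_solve : String := "46"

def Spec_solve (num : String) (out : String) : Prop := out = solve_alt num
instance (num : String) (out : String) : Decidable (Spec_solve num out) := by unfold Spec_solve; infer_instance

-- ===== CLAIM (what is proved, stated in full; the proofs are below) =====
def Claim_equal_solve : Prop := ∀ (num : String), Dom_solve num → Pre_solve num → Spec_solve num (solve num)

-- ===== LEMMAS AND PROOFS =====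

-- carry out of a digit-suffix, computed from the right, with carry-in b at the right end
def cAcc : List Int → Int → Int
  | [], b => b
  | d :: rest, b => if d + cAcc rest b ≥ 5 then 1 else 0

theorem cAcc_snoc (ys : List Int) (z a : Int) :
    cAcc (ys ++ [z]) a = cAcc ys (if z + a ≥ 5 then 1 else 0) := by
  induction ys with
  | nil => simp [cAcc]
  | cons d ys ih => simp [cAcc, ih]

theorem cAcc_zero_bounds (ds : List Int) : 0 ≤ cAcc ds 0 ∧ cAcc ds 0 ≤ 1 := by
  cases ds with
  | nil => simp [cAcc]
  | cons d rest => simp only [cAcc]; split_ifs <;> omega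

theorem bumpScan_eq_cAcc (ds : List Int) : bumpScan ds = cAcc ds 0 := by
  induction ds with
  | nil => rfl
  | cons d rest ih =>
    have hb := cAcc_zero_bounds rest
    simp only [bumpScan, cAcc, ih]
    split_ifs <;> omega

-- A's loop: folding solveStep over range(i, 0, -1) on x :: xs adds cAcc (xs.take i) 0 to the head
theorem solve_loop (i : Nat) : ∀ (x : Int) (xs : List Int), i ≤ xs.length →
    PySem.List.pyGetD ((PySem.List.pyRange (i : Int) 0 (-1)).foldl solveStep (x :: xs)) 0 0
      = x + cAcc (xs.take i) 0 := by
  induction i with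
  | zero =>
    intro x xs _
    rw [PySem.List.pyRange_neg_one_eq_nil (by omega)]
    simp [cAcc, PySem.List.pyGetD]
  | succ i ih =>
    intro x xs h
    rw [show ((i + 1 : Nat) : Int) = (i : Int) + 1 by push_cast; ring]
    rw [PySem.List.pyRange_neg_one_cons (by positivity)]
    simp only [List.foldl_cons]
    have hget : PySem.List.pyGetD (x :: xs) ((i : Int) + 1) 0 = xs[i]'(by omega) := by
      rw [show ((i : Int) + 1) = ((i + 1 : Nat) : Int) by push_cast; ring]
      simp [PySem.List.pyGetD, PySem.List.pyGet?_natCast,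
            List.getElem?_eq_getElem (by omega : i < xs.length)]
    -- the final carry as a snoc decomposition of xs.take (i+1)
    have htake : xs.take (i + 1) = xs.take i ++ [xs[i]'(by omega)] :=
      List.take_succ_eq_append_getElem (by omega)
    by_cases h5 : xs[i]'(by omega) ≥ 5
    · -- nums[i+1] >= 5: increment position i
      have hstep : solveStep (x :: xs) ((i : Int) + 1)
          = (x :: xs).set i ((x :: xs)[i]'(by simp; omega) + 1) := by
        unfold solveStep
        rw [if_pos (by rw [hget]; exact h5)]
        rw [show ((i : Int) + 1 - 1) = (i : Int) by ring]
        rw [PySem.List.pySetD_natCast]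
        congr 1
        simp [PySem.List.pyGetD, PySem.List.pyGet?_natCast,
              List.getElem?_eq_getElem (by simp; omega : i < (x :: xs).length)]
      rw [hstep]
      cases i with
      | zero =>
        rw [PySem.List.pyRange_neg_one_eq_nil (by omega)]
        simp only [List.set_cons_zero, List.foldl_nil, List.getElem_cons_zero]
        have hxs0 : xs.take 1 = [xs[0]'(by omega)] := by
          rw [show (1 : Nat) = 0 + 1 from rfl, List.take_succ_eq_append_getElem (by omega)]
          simp
        simp [PySem.List.pyGetD, hxs0, cAcc]
        omega
      | succ j =>
        have hset : (x :: xs).set (j + 1) ((x :: xs)[j + 1]'(by simp; omega) + 1)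
            = x :: xs.set j (xs[j]'(by omega) + 1) := by simp
        rw [hset]
        rw [show ((j + 1 : Nat) : Int) + 1 - 1 = ((j + 1 : Nat) : Int) by push_cast; ring]
        rw [ih x (xs.set j (xs[j]'(by omega) + 1)) (by simp; omega)]
        have htk0 : (xs.set j (xs[j]'(by omega) + 1)).take j = xs.take j := by
          apply List.ext_getElem (by simp)
          intro k h1 h2
          simp only [List.getElem_take, List.getElem_set]
          rw [if_neg (by simp at h1; omega)]
        have htk : (xs.set j (xs[j]'(by omega) + 1)).take (j + 1)
            = xs.take j ++ [xs[j]'(by omega) + 1] := by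
          rw [List.take_succ_eq_append_getElem (by simp; omega), htk0]
          simp
        have hts : xs.take (j + 1) = xs.take j ++ [xs[j]'(by omega)] :=
          List.take_succ_eq_append_getElem (by omega)
        rw [htk, htake, hts]
        simp only [cAcc_snoc, add_zero]
        rw [if_pos (show xs[j + 1]'(by omega) ≥ 5 from h5)]
    · -- nums[i+1] < 5: list unchanged
      have hstep : solveStep (x :: xs) ((i : Int) + 1) = x :: xs := by
        unfold solveStep; rw [if_neg (by rw [hget]; exact h5)]
      rw [hstep, show ((i : Nat) : Int) + 1 - 1 = ((i : Nat) : Int) by ring,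
          ih x xs (by omega), htake, cAcc_snoc, if_neg (by omega)]

-- ===== VERDICT (by name: the statement is the Claim_ definition above) =====
theorem solve_spec : Claim_equal_solve := by
  intro num _ hpre
  obtain ⟨hlen, _⟩ := hpre
  unfold Spec_solve solve solve_alt
  cases hl : num.toList with
  | nil => simp [hl] at hlen
  | cons c0 cs =>
    simp only [List.map_cons, List.length_cons]
    have hcs : 1 ≤ cs.length := by rw [hl] at hlen; simp at hlen; omega
    have hne : cs ≠ [] := by intro h; rw [h] at hcs; simp at hcs
    rw [if_neg (by simp [hne]), if_neg (by simp [hne])]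
    set d0 : Int := ((intOfDigitChar? c0).getD 0) with hd0
    set ds : List Int := cs.map (fun c => (intOfDigitChar? c).getD 0) with hds
    have hdslen : ds.length = cs.length := by simp [hds]
    rw [show ((ds.length + 1 : Nat) : Int) - 1 = ((ds.length : Nat) : Int) by push_cast; ring,
        solve_loop ds.length d0 ds (le_refl _), List.take_length, bumpScan_eq_cAcc]
    simp [PySem.List.pyGetD]
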